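-- pv_equiv track=rewrite | github.com/totongaos/CTDL_GiaiThuat_Python | UocChungThuK.py | CommonDiv
-- ===== SOURCE A (Python) =====
-- def CommonDiv(x,y,k):
--     count = 0
--     for i in range(2,x+1):
--         if x%i==0 and y%i==0:
--             count +=1
--             if count == k:
--                 return i
--     return -1
-- ===== SOURCE B (Python) =====
-- def CommonDiv(x, y, k):
--     # k-th smallest common divisor (>= 2) of x and y, or -1.
--     # Enumerate divisors of gcd(x, y) up to its square root instead of scanning 2..x.
--     if x < 2 or k < 1:
--         return -1
--     a, b = x, y
--     while b:
--         a, b = b, a % b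
--     g = abs(a)
--     small = []
--     large = []
--     i = 1
--     while i * i <= g:
--         if g % i == 0:
--             small.append(i)
--             if i != g // i:
--                 large.append(g // i)
--         i += 1
--     divs = [d for d in small + large[::-1] if d >= 2]
--     return divs[k - 1] if k <= len(divs) else -1
-- ===== Notes on version B (the rewrite author's own statement) =====
-- stated objective: faster
-- what changed: Instead of scanning all i in 2..x with two modulus tests, B reduces to g = gcd(x,y) by Euclid's algorithm and enumerates the divisors of g in pairs (i, g//i) for i up to sqrt(g), concatenating the two halves in sorted order and picking the k-th.
import Mathlib
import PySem

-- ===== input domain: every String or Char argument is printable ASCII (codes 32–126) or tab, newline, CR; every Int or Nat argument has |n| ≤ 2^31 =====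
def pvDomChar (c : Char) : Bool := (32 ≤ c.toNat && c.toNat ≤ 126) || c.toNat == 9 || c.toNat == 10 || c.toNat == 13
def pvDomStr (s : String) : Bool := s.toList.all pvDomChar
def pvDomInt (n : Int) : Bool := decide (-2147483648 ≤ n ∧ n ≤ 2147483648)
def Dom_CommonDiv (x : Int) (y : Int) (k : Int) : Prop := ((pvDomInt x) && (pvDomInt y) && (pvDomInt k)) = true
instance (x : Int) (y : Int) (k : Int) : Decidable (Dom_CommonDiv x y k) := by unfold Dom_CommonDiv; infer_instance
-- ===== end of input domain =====

-- B replaces A's linear scan of 2..x by Euclid's gcd followed by paired divisor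
-- enumeration up to sqrt(gcd(x,y)); equivalence of return values is proved for all inputs.

-- ===== PORT A =====
-- the 'for i in range(2, x+1)' loop with the early return and the running count
def CommonDivLoop (x y k : Int) : List Int → Int → Int
  | [], _ => -1
  | i :: rest, count =>
    if PySem.Int.mod x i = 0 ∧ PySem.Int.mod y i = 0 then
      (if count + 1 = k then i else CommonDivLoop x y k rest (count + 1))
    else CommonDivLoop x y k rest count

def CommonDiv (x : Int) (y : Int) (k : Int) : Int :=
  CommonDivLoop x y k (PySem.List.pyRange 2 (x + 1) 1) 0

-- ===== PORT B =====
-- termination fact for the Euclid loop: |a % b| < |b| for b ≠ 0 (Python mod has the divisor's sign)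
theorem pv_mod_natAbs_lt (a b : Int) (hb : b ≠ 0) :
    (PySem.Int.mod a b).natAbs < b.natAbs := by
  rcases lt_or_gt_of_ne hb with h | h
  · have := PySem.Int.mod_neg_bounds a h
    omega
  · have h1 := PySem.Int.mod_nonneg a h
    have h2 := PySem.Int.mod_lt a h
    omega

-- the 'while b: a, b = b, a % b' loop
def pvEuclid (a b : Int) : Int :=
  if hb : b = 0 then a else pvEuclid b (PySem.Int.mod a b)
termination_by b.natAbs
decreasing_by exact pv_mod_natAbs_lt a b hb

-- the 'while i*i <= g' loop collecting small divisors and their large partners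
def pvDivLoop (g i : Int) (small large : List Int) : List Int × List Int :=
  if h : i * i ≤ g then
    if PySem.Int.mod g i = 0 then
      pvDivLoop g (i + 1) (small ++ [i])
        (if i ≠ PySem.Int.floordiv g i then large ++ [PySem.Int.floordiv g i] else large)
    else pvDivLoop g (i + 1) small large
  else (small, large)
termination_by (g + 1 - i).toNat
decreasing_by
  all_goals
    have hi : i ≤ g := by nlinarith [sq_nonneg i]
    omega

def CommonDiv_alt (x : Int) (y : Int) (k : Int) : Int :=
  if x < 2 ∨ k < 1 then -1
  else
    let g := |pvEuclid x y|
    let p := pvDivLoop g 1 [] []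
    let divs := (p.1 ++ p.2.reverse).filter (fun d => decide (2 ≤ d))
    if k ≤ (divs.length : Int) then (PySem.List.pyGet? divs (k - 1)).getD (-1) else -1

-- ===== PRECONDITION & SPEC =====
def Spec_CommonDiv (x : Int) (y : Int) (k : Int) (out : Int) : Prop := out = CommonDiv_alt x y k
instance (x : Int) (y : Int) (k : Int) (out : Int) : Decidable (Spec_CommonDiv x y k out) := by unfold Spec_CommonDiv; infer_instance

-- ===== CLAIM (what is proved, stated in full; the proofs are below) =====
def Claim_equal_CommonDiv : Prop := ∀ (x : Int) (y : Int) (k : Int), Dom_CommonDiv x y k → Spec_CommonDiv x y k (CommonDiv x y k)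

-- ===== LEMMAS AND PROOFS =====

-- k-th element (1-based) of a list, -1 when out of range
def pvKth (l : List Int) (j : Int) : Int :=
  if 1 ≤ j ∧ j ≤ (l.length : Int) then l.getD (j - 1).toNat 0 else -1

theorem pvKth_nil (j : Int) : pvKth [] j = -1 := by
  simp [pvKth]; omega

theorem pvKth_cons_one (a : Int) (t : List Int) : pvKth (a :: t) 1 = a := by
  simp [pvKth]

theorem pvKth_cons_ne (a : Int) (t : List Int) (j : Int) (hj : j ≠ 1) :
    pvKth (a :: t) j = pvKth t (j - 1) := by
  unfold pvKth
  simp only [List.length_cons]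
  by_cases h1 : 1 ≤ j - 1 ∧ j - 1 ≤ (t.length : Int)
  · rw [if_pos h1, if_pos (by push_cast; omega)]
    have : (j - 1).toNat = (j - 1 - 1).toNat + 1 := by omega
    rw [this, List.getD_cons_succ]
  · rw [if_neg h1, if_neg (by push_cast at h1 ⊢; omega)]

-- A's loop returns the (k - count)-th element of the filtered range
theorem CommonDivLoop_eq_pvKth (x y k : Int) (l : List Int) (count : Int) :
    CommonDivLoop x y k l count =
      pvKth (l.filter (fun i => decide (PySem.Int.mod x i = 0 ∧ PySem.Int.mod y i = 0)))
        (k - count) := by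
  induction l generalizing count with
  | nil => simp [CommonDivLoop, pvKth_nil]
  | cons i rest ih =>
    by_cases hp : PySem.Int.mod x i = 0 ∧ PySem.Int.mod y i = 0
    · by_cases hk : count + 1 = k
      · simp [CommonDivLoop, hp, hk, show k - count = 1 by omega,
          pvKth_cons_one]
      · rw [CommonDivLoop, if_pos hp, if_neg hk, ih, List.filter_cons,
          if_pos (by simpa using hp), pvKth_cons_ne _ _ _ (by omega)]
        congr 1; omega
    · rw [CommonDivLoop, if_neg hp, ih, List.filter_cons, if_neg (by simpa using hp)]

-- |pvEuclid a b| is the gcd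
theorem pvEuclid_gcd (a b : Int) : |pvEuclid a b| = (Int.gcd a b : Int) := by
  induction a, b using pvEuclid.induct with
  | case1 a =>
    rw [pvEuclid, dif_pos rfl, Int.gcd_zero_right, Int.abs_eq_natAbs]
  | case2 a b hb ih =>
    rw [pvEuclid, dif_neg hb, ih]
    have hm : PySem.Int.mod a b = a + (-(PySem.Int.floordiv a b)) * b := by
      have := PySem.Int.floordiv_mul_add_mod a b
      linarith
    rw [hm]
    norm_cast
    rw [Int.gcd_add_mul_right_right, Int.gcd_comm]

-- spec lists for the divisor loop
def pvSmall (g m : Int) : List Int :=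
  (PySem.List.pyRange m (g + 1) 1).filter
    (fun d => decide (PySem.Int.mod g d = 0 ∧ d * d ≤ g))

def pvLargeSrc (g m : Int) : List Int :=
  (PySem.List.pyRange m (g + 1) 1).filter
    (fun d => decide (PySem.Int.mod g d = 0 ∧ d * d < g))

def pvLarge (g m : Int) : List Int :=
  (pvLargeSrc g m).map (fun d => PySem.Int.floordiv g d)

theorem pvDivLoop_spec (g : Int) (hg : 1 ≤ g) (i : Int) (small large : List Int)
    (hi : 1 ≤ i) :
    pvDivLoop g i small large = (small ++ pvSmall g i, large ++ pvLarge g i) := by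
  revert hi
  induction i, small, large using pvDivLoop.induct (g := g) with
  | case1 i small large h hm ih =>
    intro hi
    have hig : i < g + 1 := by nlinarith [sq_nonneg i]
    rw [pvDivLoop, dif_pos h, if_pos hm]
    have ih' := ih (by omega)
    rw [dite_eq_ite] at ih'
    rw [ih']
    have hne : (i ≠ PySem.Int.floordiv g i) ↔ i * i < g := by
      rcases (PySem.Int.mod_eq_zero_iff_dvd g i).mp hm with ⟨c, hc⟩
      rw [PySem.Int.floordiv_eq_ediv_of_pos (by omega), hc,
        Int.mul_ediv_cancel_left _ (by omega : i ≠ 0)]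
      constructor
      · intro hic
        have h2 : i * i ≤ i * c := hc ▸ h
        rcases lt_or_eq_of_le h2 with h' | h'
        · exact h'
        · exact absurd (mul_left_cancel₀ (by omega : i ≠ 0) h') hic
      · intro h' hic
        subst hic
        exact absurd h' (lt_irrefl _)
    have hsm : pvSmall g i = i :: pvSmall g (i + 1) := by
      rw [pvSmall, pvSmall, PySem.List.pyRange_one_cons hig, List.filter_cons,
        if_pos (by simp [hm, h])]
    have hlg : pvLarge g i =
        (if i * i < g then [PySem.Int.floordiv g i] else []) ++ pvLarge g (i + 1) := by
      rw [pvLarge, pvLarge, pvLargeSrc, pvLargeSrc, PySem.List.pyRange_one_cons hig,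
        List.filter_cons]
      by_cases hlt : i * i < g
      · rw [if_pos (by simp [hm, hlt]), if_pos hlt]; simp
      · rw [if_neg (by simp [hm, hlt]), if_neg hlt]; simp
    rw [hsm, hlg]
    by_cases hlt : i * i < g
    · have h1 := hne.mpr hlt
      rw [if_pos h1, if_pos hlt]
      simp [List.append_assoc]
    · have h1 : ¬ (i ≠ PySem.Int.floordiv g i) := fun hc => hlt (hne.mp hc)
      rw [if_neg h1, if_neg hlt]
      simp [List.append_assoc]
  | case2 i small large h hm ih =>
    intro hi
    have hig : i < g + 1 := by nlinarith [sq_nonneg i]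
    rw [pvDivLoop, dif_pos h, if_neg hm, ih (by omega)]
    have hsm : pvSmall g i = pvSmall g (i + 1) := by
      rw [pvSmall, pvSmall, PySem.List.pyRange_one_cons hig, List.filter_cons,
        if_neg (by simp [hm])]
    have hlg : pvLarge g i = pvLarge g (i + 1) := by
      rw [pvLarge, pvLarge, pvLargeSrc, pvLargeSrc, PySem.List.pyRange_one_cons hig,
        List.filter_cons, if_neg (by simp [hm])]
    rw [hsm, hlg]
  | case3 i small large h =>
    intro hi
    rw [pvDivLoop, dif_neg h]
    have hsm : pvSmall g i = [] := by
      rw [pvSmall, List.filter_eq_nil_iff]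
      intro d hd
      have := (PySem.List.mem_pyRange_one).mp hd
      simp only [decide_eq_true_eq, not_and]
      intro _
      nlinarith
    have hlg : pvLarge g i = [] := by
      rw [pvLarge, pvLargeSrc, List.filter_eq_nil_iff.mpr, List.map_nil]
      intro d hd
      have := (PySem.List.mem_pyRange_one).mp hd
      simp only [decide_eq_true_eq, not_and]
      intro _
      nlinarith
    rw [hsm, hlg]
    simp

theorem pv_sorted_ext (l1 l2 : List Int) (h1 : l1.Pairwise (· < ·)) (h2 : l2.Pairwise (· < ·))
    (h : ∀ a, a ∈ l1 ↔ a ∈ l2) : l1 = l2 := by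
  have p : l1.Perm l2 := by
    apply List.perm_of_nodup_nodup_toFinset_eq (h1.nodup) (h2.nodup)
    ext a; simp [List.mem_toFinset, h a]
  exact p.eq_of_pairwise (fun a b _ _ hab hba => le_antisymm hab.le hba.le) h1 h2

theorem pvSmall_mem (g m a : Int) :
    a ∈ pvSmall g m ↔ m ≤ a ∧ a < g + 1 ∧ PySem.Int.mod g a = 0 ∧ a * a ≤ g := by
  rw [pvSmall, List.mem_filter, PySem.List.mem_pyRange_one]
  simp only [decide_eq_true_eq]
  tauto

theorem pvLargeSrc_mem (g m a : Int) :
    a ∈ pvLargeSrc g m ↔ m ≤ a ∧ a < g + 1 ∧ PySem.Int.mod g a = 0 ∧ a * a < g := by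
  rw [pvLargeSrc, List.mem_filter, PySem.List.mem_pyRange_one]
  simp only [decide_eq_true_eq]
  tauto

theorem pvLarge_mem (g : Int) (hg : 1 ≤ g) (a : Int) :
    a ∈ pvLarge g 1 ↔ ∃ d, 1 ≤ d ∧ PySem.Int.mod g d = 0 ∧ d * d < g ∧
      a = PySem.Int.floordiv g d := by
  rw [pvLarge, List.mem_map]
  constructor
  · rintro ⟨d, hd, rfl⟩
    rcases (pvLargeSrc_mem g 1 d).mp hd with ⟨h1, _, h3, h4⟩
    exact ⟨d, h1, h3, h4, rfl⟩
  · rintro ⟨d, h1, h3, h4, rfl⟩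
    refine ⟨d, (pvLargeSrc_mem g 1 d).mpr ⟨h1, by nlinarith, h3, h4⟩, rfl⟩

theorem pvSmall_pairwise (g : Int) : (pvSmall g 1).Pairwise (· < ·) :=
  (PySem.List.pairwise_lt_pyRange_one 1 (g+1)).filter _

-- two divisors d1 < d2 of g give g/d2 < g/d1
theorem pv_div_antitone (g : Int) (hg : 1 ≤ g) (d1 d2 : Int) (h1 : 1 ≤ d1) (h2 : 1 ≤ d2)
    (hm1 : PySem.Int.mod g d1 = 0) (hm2 : PySem.Int.mod g d2 = 0) (hlt : d1 < d2) :
    PySem.Int.floordiv g d2 < PySem.Int.floordiv g d1 := by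
  rcases (PySem.Int.mod_eq_zero_iff_dvd g d1).mp hm1 with ⟨c1, hc1⟩
  rcases (PySem.Int.mod_eq_zero_iff_dvd g d2).mp hm2 with ⟨c2, hc2⟩
  have e1 : PySem.Int.floordiv g d1 = c1 := by
    rw [PySem.Int.floordiv_eq_ediv_of_pos (by omega), hc1,
      Int.mul_ediv_cancel_left _ (by omega : d1 ≠ 0)]
  have e2 : PySem.Int.floordiv g d2 = c2 := by
    rw [PySem.Int.floordiv_eq_ediv_of_pos (by omega), hc2,
      Int.mul_ediv_cancel_left _ (by omega : d2 ≠ 0)]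
  rw [e1, e2]
  have hc2p : 1 ≤ c2 := by nlinarith
  nlinarith

theorem pvLarge_reverse_pairwise (g : Int) (hg : 1 ≤ g) :
    (pvLarge g 1).reverse.Pairwise (· < ·) := by
  rw [List.pairwise_reverse, pvLarge, List.pairwise_map]
  have hp : (pvLargeSrc g 1).Pairwise (· < ·) :=
    (PySem.List.pairwise_lt_pyRange_one 1 (g+1)).filter _
  have hmem := List.Pairwise.and_mem.mp hp
  refine hmem.imp ?_
  rintro a b ⟨ha, hb, hab⟩
  rcases (pvLargeSrc_mem g 1 a).mp ha with ⟨h1a, _, hma, _⟩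
  rcases (pvLargeSrc_mem g 1 b).mp hb with ⟨h1b, _, hmb, _⟩
  exact pv_div_antitone g hg a b h1a h1b hma hmb hab

theorem pv_small_lt_large (g : Int) (hg : 1 ≤ g) (a : Int) (h1a : 1 ≤ a)
    (hma : PySem.Int.mod g a = 0) (haa : a * a ≤ g) (d : Int) (h1d : 1 ≤ d)
    (hmd : PySem.Int.mod g d = 0) (hdd : d * d < g) : a < PySem.Int.floordiv g d := by
  rcases (PySem.Int.mod_eq_zero_iff_dvd g d).mp hmd with ⟨c, hc⟩
  rw [PySem.Int.floordiv_eq_ediv_of_pos (by omega), hc,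
    Int.mul_ediv_cancel_left _ (by omega : d ≠ 0)]
  have hc1 : 1 ≤ c := by nlinarith
  by_contra hca
  push_neg at hca
  have hdc : d < c := by nlinarith
  have h1 : c * c ≤ a * a := mul_le_mul hca hca (by omega) (by omega)
  nlinarith

-- the assembled divisor list is exactly the ascending list of divisors of g in [1, g]
theorem pv_divs_eq (g : Int) (hg : 1 ≤ g) :
    pvSmall g 1 ++ (pvLarge g 1).reverse =
      (PySem.List.pyRange 1 (g + 1) 1).filter (fun d => decide (PySem.Int.mod g d = 0)) := by
  apply pv_sorted_ext
  · -- LHS is strictly increasing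
    rw [List.pairwise_append]
    refine ⟨pvSmall_pairwise g, pvLarge_reverse_pairwise g hg, ?_⟩
    intro a ha b hb
    rcases pvSmall_mem g 1 a |>.mp ha with ⟨h1a, _, hda, haa⟩
    rcases List.mem_reverse.mp hb |> (pvLarge_mem g hg b).mp with ⟨d, hd1, hdd, hdlt, rfl⟩
    exact pv_small_lt_large g hg a h1a hda haa d hd1 hdd hdlt
  · exact (PySem.List.pairwise_lt_pyRange_one 1 (g+1)).filter _
  · intro a
    constructor
    · intro ha
      rcases List.mem_append.mp ha with ha | ha
      · rcases (pvSmall_mem g 1 a).mp ha with ⟨h1, h2, h3, _⟩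
        rw [List.mem_filter, PySem.List.mem_pyRange_one]
        exact ⟨⟨h1, by omega⟩, by simpa using h3⟩
      · rcases (pvLarge_mem g hg a).mp (List.mem_reverse.mp ha) with ⟨d, hd1, hdd, hdlt, rfl⟩
        rcases (PySem.Int.mod_eq_zero_iff_dvd g d).mp hdd with ⟨c, hc⟩
        have hdg : d ≤ g := by nlinarith
        have hfc : PySem.Int.floordiv g d = c := by
          rw [PySem.Int.floordiv_eq_ediv_of_pos (by omega), hc,
            Int.mul_ediv_cancel_left _ (by omega : d ≠ 0)]
        have hc1 : 1 ≤ c := by nlinarith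
        have hcg : c ≤ g := by nlinarith
        rw [hfc, List.mem_filter, PySem.List.mem_pyRange_one]
        refine ⟨⟨hc1, by omega⟩, ?_⟩
        simp only [decide_eq_true_eq]
        exact (PySem.Int.mod_eq_zero_iff_dvd g c).mpr ⟨d, by linarith [hc]⟩
    · intro ha
      rcases List.mem_filter.mp ha with ⟨hr, hm⟩
      rcases PySem.List.mem_pyRange_one.mp hr with ⟨h1, h2⟩
      simp only [decide_eq_true_eq] at hm
      rw [List.mem_append]
      by_cases haa : a * a ≤ g
      · exact Or.inl ((pvSmall_mem g 1 a).mpr ⟨h1, by omega, hm, haa⟩)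
      · right
        rw [List.mem_reverse, pvLarge_mem g hg]
        rcases (PySem.Int.mod_eq_zero_iff_dvd g a).mp hm with ⟨c, hc⟩
        have hc1 : 1 ≤ c := by nlinarith
        have hca : c < a := by nlinarith
        have hcg : c ≤ g := by nlinarith
        refine ⟨c, hc1, (PySem.Int.mod_eq_zero_iff_dvd g c).mpr ⟨a, by linarith [hc]⟩,
          by nlinarith, ?_⟩
        rw [PySem.Int.floordiv_eq_ediv_of_pos (by omega), hc, mul_comm,
          Int.mul_ediv_cancel_left _ (by omega : c ≠ 0)]

theorem pvKth_eq_py (l : List Int) (k : Int) (hk : 1 ≤ k) :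
    (if k ≤ (l.length : Int) then (PySem.List.pyGet? l (k - 1)).getD (-1) else -1) = pvKth l k := by
  by_cases h : k ≤ (l.length : Int)
  · rw [if_pos h]
    unfold pvKth
    rw [if_pos ⟨hk, h⟩]
    have hn : (k - 1).toNat < l.length := by omega
    rw [PySem.List.pyGet?_of_nonneg l (by omega : (0:Int) ≤ k - 1), List.getD_eq_getElem?_getD,
      List.getElem?_eq_getElem hn]
    simp
  · rw [if_neg h]
    unfold pvKth
    rw [if_neg (fun hc => h hc.2)]

theorem pv_dvd_gcd (d x y : Int) (h1 : d ∣ x) (h2 : d ∣ y) : d ∣ (Int.gcd x y : Int) := by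
  have h : d.natAbs ∣ Int.gcd x y :=
    Nat.dvd_gcd (Int.natAbs_dvd_natAbs.mpr h1) (Int.natAbs_dvd_natAbs.mpr h2)
  exact Int.natAbs_dvd.mp (Int.natCast_dvd_natCast.mpr h)

theorem pv_filter_gcd (x y : Int) (hx : 2 ≤ x) (G : Int) (hgg : G = (Int.gcd x y : Int))
    (hg1 : 1 ≤ G) :
    ((PySem.List.pyRange 1 (G + 1) 1).filter
        (fun d => decide (PySem.Int.mod G d = 0))).filter (fun d => decide (2 ≤ d))
      = (PySem.List.pyRange 2 (x + 1) 1).filter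
          (fun i => decide (PySem.Int.mod x i = 0 ∧ PySem.Int.mod y i = 0)) := by
  have hdvdx : G ∣ x := by rw [hgg]; exact Int.gcd_dvd_left x y
  have hdvdy : G ∣ y := by rw [hgg]; exact Int.gcd_dvd_right x y
  have hGx : G ≤ x := Int.le_of_dvd (by omega) hdvdx
  rw [PySem.List.pyRange_one_cons (by omega : (1:Int) < G + 1), List.filter_cons,
    if_pos (by simp [PySem.Int.mod_eq_zero_iff_dvd]),
    List.filter_cons, if_neg (by simp)]
  rw [List.filter_eq_self.mpr (by
    intro a ha
    have := PySem.List.mem_pyRange_one.mp (List.mem_of_mem_filter ha)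
    simp only [decide_eq_true_eq]
    omega)]
  rw [PySem.List.pyRange_one_append 2 (G + 1) (x + 1) (by omega) (by omega),
    List.filter_append]
  have htail : (PySem.List.pyRange (G + 1) (x + 1) 1).filter
      (fun i => decide (PySem.Int.mod x i = 0 ∧ PySem.Int.mod y i = 0)) = [] := by
    rw [List.filter_eq_nil_iff]
    intro d hd
    have hdr := PySem.List.mem_pyRange_one.mp hd
    simp only [decide_eq_true_eq, not_and]
    intro h1 h2
    have hdg : d ∣ G := by
      rw [hgg]
      exact pv_dvd_gcd d x y ((PySem.Int.mod_eq_zero_iff_dvd x d).mp h1)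
        ((PySem.Int.mod_eq_zero_iff_dvd y d).mp h2)
    have := Int.le_of_dvd (by omega) hdg
    omega
  rw [htail, List.append_nil]
  apply List.filter_congr
  intro d hd
  have hdr := PySem.List.mem_pyRange_one.mp hd
  simp only [decide_eq_decide]
  constructor
  · intro h
    have hdg := (PySem.Int.mod_eq_zero_iff_dvd G d).mp h
    exact ⟨(PySem.Int.mod_eq_zero_iff_dvd x d).mpr (hdg.trans hdvdx),
      (PySem.Int.mod_eq_zero_iff_dvd y d).mpr (hdg.trans hdvdy)⟩
  · rintro ⟨h1, h2⟩
    refine (PySem.Int.mod_eq_zero_iff_dvd G d).mpr ?_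
    rw [hgg]
    exact pv_dvd_gcd d x y ((PySem.Int.mod_eq_zero_iff_dvd x d).mp h1)
      ((PySem.Int.mod_eq_zero_iff_dvd y d).mp h2)

-- ===== VERDICT (by name: the statement is the Claim_ definition above) =====
theorem CommonDiv_spec : Claim_equal_CommonDiv := by
  intro x y k _
  unfold Spec_CommonDiv
  rw [CommonDiv, CommonDivLoop_eq_pvKth, sub_zero]
  by_cases hx : x < 2
  · rw [CommonDiv_alt, if_pos (Or.inl hx), PySem.List.pyRange_one_eq_nil (by omega),
      List.filter_nil, pvKth_nil]
  · by_cases hk : k < 1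
    · rw [CommonDiv_alt, if_pos (Or.inr hk)]
      unfold pvKth
      rw [if_neg (fun hc => absurd hc.1 (by omega))]
    · push_neg at hx hk
      have hgg : |pvEuclid x y| = (Int.gcd x y : Int) := pvEuclid_gcd x y
      have hg1 : 1 ≤ |pvEuclid x y| := by
        rw [hgg]
        have hne : Int.gcd x y ≠ 0 := by
          intro h
          have := Int.gcd_eq_zero_iff.mp h
          omega
        omega
      rw [CommonDiv_alt, if_neg (by omega)]
      simp only [pvDivLoop_spec _ hg1 1 [] [] le_rfl, List.nil_append,
        pv_divs_eq _ hg1, pv_filter_gcd x y hx _ hgg hg1, pvKth_eq_py _ k hk]
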